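-- pv_equiv track=rewrite | github.com/amavel-git/sofia-ai-assistant | app/filter_external_signals.py | detect_concepts
-- ===== SOURCE A (Python) =====
-- def detect_concepts(text: str, concept_terms: dict):
--     text_lower = text.lower()
--     matched_concepts = []
--
--     for concept, terms in concept_terms.items():
--         for term in terms:
--             if term in text_lower:
--                 matched_concepts.append(concept)
--                 break
--
--     return matched_concepts
-- ===== SOURCE B (Python) =====
-- def detect_concepts(text: str, concept_terms: dict):
--     # Precompute one set of all substrings of text_lower of the needed lengths,
--     # then every term check is a single hash lookup.
--     text_lower = text.lower()
--     n = len(text_lower)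
--     lengths = set()
--     for terms in concept_terms.values():
--         for term in terms:
--             lengths.add(len(term))
--     subs = set()
--     for L in lengths:
--         for i in range(n - L + 1):
--             subs.add(text_lower[i:i + L])
--     return [c for c, ts in concept_terms.items() if any(t in subs for t in ts)]
-- ===== Notes on version B (the rewrite author's own statement) =====
-- stated objective: faster
-- what changed: Instead of scanning the text once per term (one substring search per term), B precomputes a single hash set of all window substrings of the lowered text at the distinct term lengths, so every term check becomes one set lookup; the concept list is then a single filtered pass over the dict items.
import Mathlib
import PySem

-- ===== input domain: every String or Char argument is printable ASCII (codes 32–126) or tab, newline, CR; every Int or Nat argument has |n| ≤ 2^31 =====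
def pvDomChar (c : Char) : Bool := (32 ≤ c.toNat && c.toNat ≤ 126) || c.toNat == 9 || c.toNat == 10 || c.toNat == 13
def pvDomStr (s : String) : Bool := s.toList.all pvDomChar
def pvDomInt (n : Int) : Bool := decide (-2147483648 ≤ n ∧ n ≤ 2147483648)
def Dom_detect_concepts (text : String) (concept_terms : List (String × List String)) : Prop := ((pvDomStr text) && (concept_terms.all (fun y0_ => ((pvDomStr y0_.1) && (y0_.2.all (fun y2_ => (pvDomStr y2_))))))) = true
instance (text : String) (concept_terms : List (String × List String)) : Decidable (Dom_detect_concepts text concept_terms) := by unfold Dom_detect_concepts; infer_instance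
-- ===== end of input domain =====

-- B replaces A's per-term substring scans by one precomputed set of all window
-- substrings of the text (at the needed lengths), so each term check is a set lookup
-- (objective: alternative algorithm; equal return value proved below).

-- ===== PORT A =====
-- inner 'for term in terms: if term in text_lower: append; break'
def pvAInner (tl : String) (concept : String) (terms : List String) (acc : List String) : List String :=
  match terms with
  | [] => acc
  | t :: rest => if PySem.Str.isIn t tl then acc ++ [concept] else pvAInner tl concept rest acc

def detect_concepts (text : String) (concept_terms : List (String × List String)) : List String :=
  let text_lower := PySem.Str.lower text
  concept_terms.foldl (fun acc p => pvAInner text_lower p.1 p.2 acc) []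

-- ===== PORT B =====
def detect_concepts_alt (text : String) (concept_terms : List (String × List String)) : List String :=
  let text_lower := PySem.Str.lower text
  let n : Int := (PySem.Str.len text_lower : Int)
  let lengths : PySem.Set Int :=
    concept_terms.foldl (fun s p => p.2.foldl (fun s t => PySem.Set.add s ((PySem.Str.len t : Int))) s) PySem.Set.empty
  let subs : PySem.Set String :=
    lengths.foldl (fun s L => (PySem.List.pyRange 0 (n - L + 1) 1).foldl
      (fun s i => PySem.Set.add s (PySem.Str.slice text_lower (some i) (some (i + L)))) s) PySem.Set.empty
  (concept_terms.filter (fun p => p.2.any (fun t => PySem.Set.contains subs t))).map (fun p => p.1)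

-- ===== PRECONDITION & SPEC =====
def Spec_detect_concepts (text : String) (concept_terms : List (String × List String)) (out : List String) : Prop := out = detect_concepts_alt text concept_terms
instance (text : String) (concept_terms : List (String × List String)) (out : List String) : Decidable (Spec_detect_concepts text concept_terms out) := by unfold Spec_detect_concepts; infer_instance

-- ===== CLAIM (what is proved, stated in full; the proofs are below) =====
def Claim_equal_detect_concepts : Prop := ∀ (text : String) (concept_terms : List (String × List String)), Dom_detect_concepts text concept_terms → Spec_detect_concepts text concept_terms (detect_concepts text concept_terms)

-- ===== LEMMAS AND PROOFS =====

theorem pvAInner_eq (tl concept : String) (terms : List String) (acc : List String) :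
    pvAInner tl concept terms acc =
      if terms.any (fun t => PySem.Str.isIn t tl) then acc ++ [concept] else acc := by
  induction terms with
  | nil => simp [pvAInner]
  | cons t rest ih =>
    simp only [pvAInner, List.any_cons, Bool.or_eq_true, ih]
    split_ifs <;> tauto

theorem pv_mem_foldl_add {α β : Type} [BEq β] [LawfulBEq β] (l : List α) (f : α → β)
    (s : PySem.Set β) (x : β) :
    x ∈ l.foldl (fun s a => PySem.Set.add s (f a)) s ↔ x ∈ s ∨ ∃ a ∈ l, f a = x := by
  induction l generalizing s with
  | nil => simp
  | cons a l ih =>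
    rw [List.foldl_cons, ih]
    simp [PySem.Set.mem_add]
    tauto

theorem pv_mem_foldl_foldl_add {α γ β : Type} [BEq β] [LawfulBEq β] (l : List α)
    (g : α → List γ) (f : α → γ → β) (s : PySem.Set β) (x : β) :
    x ∈ l.foldl (fun s a => (g a).foldl (fun s b => PySem.Set.add s (f a b)) s) s ↔
      x ∈ s ∨ ∃ a ∈ l, ∃ b ∈ g a, f a b = x := by
  induction l generalizing s with
  | nil => simp
  | cons a l ih =>
    rw [List.foldl_cons, ih, pv_mem_foldl_add]
    simp only [List.exists_mem_cons_iff]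
    exact or_assoc

theorem pv_len_nonneg (s : String) : 0 ≤ PySem.Str.len s := by simp

-- windows of length L at valid starts are exactly the infix lists of that length
theorem pv_window_iff (cs : List Char) (L : Int) (hL : 0 ≤ L) (t : List Char) :
    (∃ i ∈ PySem.List.pyRange 0 ((cs.length : Int) - L + 1) 1,
        PySem.List.slice cs (some i) (some (i + L)) = t) ↔
      ((t.length : Int) = L ∧ t <:+: cs) := by
  constructor
  · rintro ⟨i, hi, heq⟩
    rw [PySem.List.mem_pyRange_one] at hi
    obtain ⟨hi0, hilt⟩ := hi
    obtain ⟨j, rfl⟩ := Int.eq_ofNat_of_zero_le hi0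
    obtain ⟨k, rfl⟩ := Int.eq_ofNat_of_zero_le hL
    have hjk : j + k ≤ cs.length := by omega
    rw [show ((j : Int) + k) = ((j + k : Nat) : Int) by push_cast; ring] at heq
    rw [PySem.List.slice_natCast] at heq
    have hlen : ((cs.drop j).take (j + k - j)).length = k := by
      simp only [List.length_take, List.length_drop]; omega
    subst heq
    constructor
    · simp only [hlen]
    · exact ((List.take_prefix _ _).isInfix).trans (List.drop_suffix _ _).isInfix
  · rintro ⟨hlen, pre, suf, hps⟩
    refine ⟨(pre.length : Int), ?_, ?_⟩
    · rw [PySem.List.mem_pyRange_one]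
      have : cs.length = pre.length + t.length + suf.length := by
        subst hps; simp; omega
      constructor
      · omega
      · omega
    · rw [show ((pre.length : Int) + L) = ((pre.length + t.length : Nat) : Int) by push_cast; omega]
      rw [PySem.List.slice_natCast]
      subst hps
      simp

theorem pv_main (text : String) (concept_terms : List (String × List String)) :
    detect_concepts text concept_terms = detect_concepts_alt text concept_terms := by
  unfold detect_concepts detect_concepts_alt
  simp only []
  set tl := PySem.Str.lower text with htl
  set n : Int := (PySem.Str.len tl : Int) with hn
  set lengths : PySem.Set Int :=
    concept_terms.foldl (fun s p => p.2.foldl (fun s t => PySem.Set.add s ((PySem.Str.len t : Int))) s) PySem.Set.empty with hlengths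
  set subs : PySem.Set String :=
    lengths.foldl (fun s L => (PySem.List.pyRange 0 (n - L + 1) 1).foldl
      (fun s i => PySem.Set.add s (PySem.Str.slice tl (some i) (some (i + L)))) s) PySem.Set.empty with hsubs
  -- membership characterisations
  have hmemlen : ∀ L : Int, L ∈ lengths ↔ ∃ p ∈ concept_terms, ∃ t ∈ p.2, ((PySem.Str.len t : Int)) = L := by
    intro L
    rw [hlengths]
    rw [pv_mem_foldl_foldl_add concept_terms (fun p => p.2) (fun _ t => ((PySem.Str.len t : Int))) PySem.Set.empty L]
    simp [PySem.Set.empty]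
  have hmemsubs : ∀ x : String, x ∈ subs ↔ ∃ L ∈ lengths, ∃ i ∈ PySem.List.pyRange 0 (n - L + 1) 1,
      PySem.Str.slice tl (some i) (some (i + L)) = x := by
    intro x
    rw [hsubs]
    rw [pv_mem_foldl_foldl_add lengths (fun L => PySem.List.pyRange 0 (n - L + 1) 1)
      (fun L i => PySem.Str.slice tl (some i) (some (i + L))) PySem.Set.empty x]
    simp [PySem.Set.empty]
  -- pointwise: for a term of a listed concept, set lookup = substring test
  have hpoint : ∀ p ∈ concept_terms, ∀ t ∈ p.2, PySem.Set.contains subs t = PySem.Str.isIn t tl := by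
    intro p hp t ht
    have hLmem : ((PySem.Str.len t : Int)) ∈ lengths := (hmemlen _).mpr ⟨p, hp, t, ht, rfl⟩
    rw [Bool.eq_iff_iff, PySem.Set.contains_iff, PySem.Str.isIn_iff_infix, hmemsubs]
    constructor
    · rintro ⟨L, hL, i, hi, heq⟩
      have hL0 : 0 ≤ L := by
        obtain ⟨q, _, u, _, rfl⟩ := (hmemlen L).mp hL
        exact pv_len_nonneg u
      have : ((t.toList.length : Int) = L ∧ t.toList <:+: tl.toList) := by
        rw [← pv_window_iff tl.toList L hL0 t.toList]
        refine ⟨i, ?_, ?_⟩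
        · simpa [hn] using hi
        · rw [← heq]; simp [PySem.Str.slice]
      exact this.2
    · intro hinf
      refine ⟨((PySem.Str.len t : Int)), hLmem, ?_⟩
      have hwin := (pv_window_iff tl.toList ((PySem.Str.len t : Int)) (pv_len_nonneg t) t.toList).mpr
        ⟨by simp, hinf⟩
      obtain ⟨i, hi, heq⟩ := hwin
      refine ⟨i, by simpa [hn] using hi, ?_⟩
      apply String.toList_injective
      rw [← heq]; simp [PySem.Str.slice]
  -- A's loop as filter/map
  have hA : concept_terms.foldl (fun acc p => pvAInner tl p.1 p.2 acc) [] =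
      (concept_terms.filter (fun p => p.2.any (fun t => PySem.Str.isIn t tl))).map (fun p => p.1) := by
    have h1 : concept_terms.foldl (fun acc p => pvAInner tl p.1 p.2 acc) [] =
        concept_terms.foldl (fun acc (p : String × List String) =>
          if p.2.any (fun t => PySem.Str.isIn t tl) then acc ++ [p.1] else acc) [] :=
      PySem.List.foldl_congr_mem _ _ _ _ (fun acc p _ => pvAInner_eq tl p.1 p.2 acc)
    rw [h1]
    simpa using PySem.List.foldl_append_if (l := concept_terms)
      (p := fun p => p.2.any (fun t => PySem.Str.isIn t tl)) (f := fun p => p.1) (acc := [])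
  rw [hA]
  congr 1
  apply List.filter_congr
  intro p hp
  exact PySem.List.any_congr_mem (fun t ht => (hpoint p hp t ht).symm)

-- ===== VERDICT (by name: the statement is the Claim_ definition above) =====
theorem detect_concepts_spec : Claim_equal_detect_concepts := by
  intro text concept_terms _
  unfold Spec_detect_concepts
  exact pv_main text concept_terms
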